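-- pv_equiv track=rewrite | github.com/dawoodaijaz97/Leetcode | maximize-score-after-pair-deletions/solution.py | solve
-- ===== SOURCE A (Python) =====
-- def solve(nums: list[int]) -> int:
--     """
--     Maximize the score after pair deletions.
--
--     Args:
--         nums (list[int]): A list of integers.
--
--     Returns:
--         int: The maximum score.
--     """
--     from collections import Counter
--
--     # Count the frequency of each number
--     freq = Counter(nums)
--
--     max_score = 0
--
--     for num, count in freq.items():
--         # Calculate the contribution of this number to the score
--         pairs = count // 2
--         max_score += pairs * (num ** 2)
--
--     return max_score
-- ===== SOURCE B (Python) =====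
-- def solve(nums: list[int]) -> int:
--     # Sort a copy and pair adjacent equal elements; no frequency map is built.
--     s = sorted(nums)
--     score = 0
--     i = 0
--     n = len(s)
--     while i < n:
--         if i + 1 < n and s[i] == s[i + 1]:
--             score += s[i] * s[i]
--             i += 2
--         else:
--             i += 1
--     return score
-- ===== Notes on version B (the rewrite author's own statement) =====
-- stated objective: alternative
-- what changed: Replaces the Counter frequency map and per-value pairs*num**2 loop with sorting a copy and pairing adjacent equal elements in one scan, squaring each completed pair.
import Mathlib
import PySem

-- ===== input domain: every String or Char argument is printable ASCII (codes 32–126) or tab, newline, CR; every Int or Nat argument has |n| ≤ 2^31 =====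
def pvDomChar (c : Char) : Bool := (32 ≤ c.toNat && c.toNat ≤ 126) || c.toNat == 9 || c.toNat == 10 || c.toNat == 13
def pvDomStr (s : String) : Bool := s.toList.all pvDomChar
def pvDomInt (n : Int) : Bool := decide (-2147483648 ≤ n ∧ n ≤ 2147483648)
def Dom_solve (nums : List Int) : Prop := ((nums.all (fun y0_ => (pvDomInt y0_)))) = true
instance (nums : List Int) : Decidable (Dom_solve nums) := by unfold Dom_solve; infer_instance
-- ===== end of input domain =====

-- B sorts a copy and pairs adjacent equal elements in one scan, instead of building a Counter; same cost class, no frequency map.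


-- ===== PORT A =====
def solve (nums : List Int) : Int :=
  let freq := PySem.Dict.counter nums
  freq.items.foldl (fun acc p => acc + PySem.Int.floordiv p.2 2 * p.1 ^ 2) 0

-- ===== PORT B =====
-- the while loop over index i, as structural recursion on the remaining suffix of the sorted list
def pairLoop : List Int → Int
  | [] => 0
  | [_] => 0
  | a :: b :: t => if a = b then a * a + pairLoop t else pairLoop (b :: t)

def solve_alt (nums : List Int) : Int :=
  pairLoop (PySem.List.sorted nums (fun x => x) false)

-- ===== PRECONDITION & SPEC =====
def Spec_solve (nums : List Int) (out : Int) : Prop := out = solve_alt nums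
instance (nums : List Int) (out : Int) : Decidable (Spec_solve nums out) := by unfold Spec_solve; infer_instance

-- ===== CLAIM (what is proved, stated in full; the proofs are below) =====
def Claim_equal_solve : Prop := ∀ (nums : List Int), Dom_solve nums → Spec_solve nums (solve nums)

-- ===== LEMMAS AND PROOFS =====

-- the contribution of value k given the surrounding multiset xs
def contrib (xs : List Int) (k : Int) : Int :=
  PySem.Int.floordiv (xs.count k : Int) 2 * k ^ 2

theorem solve_eq_sum (nums : List Int) :
    solve nums = ∑ k ∈ nums.toFinset, contrib nums k := by
  have hnd : (PySem.Set.ofList nums).Nodup := PySem.Set.nodup_ofList nums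
  have htf : (PySem.Set.ofList nums).toFinset = nums.toFinset := by
    apply Finset.ext
    intro x
    simp [PySem.Set.mem_ofList]
  calc solve nums
      = ((PySem.Set.ofList nums).map (fun k => (k, (nums.count k : Int)))).foldl
          (fun acc p => acc + PySem.Int.floordiv p.2 2 * p.1 ^ 2) 0 := by
        simp only [solve, PySem.Dict.items_counter]
    _ = ((PySem.Set.ofList nums).map (contrib nums)).sum := by
        rw [PySem.List.foldl_add, zero_add, List.map_map]
        exact congrArg List.sum (List.map_congr_left (fun k _ => rfl))
    _ = ∑ k ∈ nums.toFinset, contrib nums k := by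
        rw [← List.sum_toFinset _ hnd, htf]

theorem floordiv_add_two (c : Int) :
    PySem.Int.floordiv (c + 2) 2 = PySem.Int.floordiv c 2 + 1 := by
  rw [PySem.Int.floordiv_eq_ediv_of_pos (by norm_num),
      PySem.Int.floordiv_eq_ediv_of_pos (by norm_num)]
  omega

theorem pairLoop_eq_sum (s : List Int) (hs : s.Pairwise (· ≤ ·)) :
    pairLoop s = ∑ k ∈ s.toFinset, contrib s k := by
  induction s using pairLoop.induct with
  | case1 => simp [pairLoop]
  | case2 a =>
      simp [pairLoop, contrib, PySem.Int.floordiv]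
  | case3 a t ih =>
      have hpt : t.Pairwise (· ≤ ·) := (hs.of_cons).of_cons
      have hmem : a ∈ insert a t.toFinset := Finset.mem_insert_self a _
      have hcount_ne : ∀ k, k ≠ a → (a :: a :: t).count k = t.count k := by
        intro k hk
        simp [Ne.symm hk]
      have hca : ((a :: a :: t).count a : Int) = (t.count a : Int) + 2 := by
        simp
        ring
      have htf : (a :: a :: t).toFinset = insert a t.toFinset := by
        simp
      rw [pairLoop, if_pos rfl, ih hpt, htf]
      -- sum over insert a T of contrib (a::a::t) = a*a + sum over T of contrib t
      have hstep1 : ∑ k ∈ insert a t.toFinset, contrib (a :: a :: t) k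
          = ∑ k ∈ insert a t.toFinset, contrib t k + a * a := by
        rw [← Finset.add_sum_erase _ _ hmem, ← Finset.add_sum_erase _ _ hmem]
        have h1 : contrib (a :: a :: t) a = contrib t a + a * a := by
          simp only [contrib, hca, floordiv_add_two]
          ring
        have h2 : ∑ k ∈ (insert a t.toFinset).erase a, contrib (a :: a :: t) k
            = ∑ k ∈ (insert a t.toFinset).erase a, contrib t k := by
          apply Finset.sum_congr rfl
          intro k hk
          have hk' : k ≠ a := (Finset.mem_erase.mp hk).1
          simp [contrib, hcount_ne k hk']
        rw [h1, h2]
        ring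
      have hstep2 : ∑ k ∈ insert a t.toFinset, contrib t k
          = ∑ k ∈ t.toFinset, contrib t k := by
        by_cases hat : a ∈ t.toFinset
        · rw [Finset.insert_eq_self.mpr hat]
        · rw [Finset.sum_insert hat]
          have : t.count a = 0 := by
            simp [List.count_eq_zero]
            exact fun h => hat (List.mem_toFinset.mpr h)
          simp [contrib, this, PySem.Int.floordiv]
      rw [hstep1, hstep2]
      ring
  | case4 a b t hab ih =>
      have hpbt : (b :: t).Pairwise (· ≤ ·) := hs.of_cons
      have hle : ∀ y ∈ b :: t, a ≤ y := (List.pairwise_cons.mp hs).1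
      have hnotmem : a ∉ b :: t := by
        intro hmem
        rcases List.mem_cons.mp hmem with h | h
        · exact hab h
        · have h1 : a ≤ b := hle b (List.mem_cons_self)
          have h2 : b ≤ a := by
            rcases List.pairwise_cons.mp hpbt with ⟨hb, _⟩
            exact hb a h
          exact hab (le_antisymm h1 h2)
      have htf : (a :: b :: t).toFinset = insert a (b :: t).toFinset := by simp
      rw [pairLoop, if_neg hab, ih hpbt, htf]
      have hna : a ∉ (b :: t).toFinset := fun h => hnotmem (List.mem_toFinset.mp h)
      rw [Finset.sum_insert hna]
      have hca : (a :: b :: t).count a = 1 := by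
        simp [List.count_eq_zero.mpr hnotmem]
      have h0 : contrib (a :: b :: t) a = 0 := by
        simp [contrib, hca, PySem.Int.floordiv]
      rw [h0, zero_add]
      apply Finset.sum_congr rfl
      intro k hk
      have hk' : k ≠ a := fun h => hna (h ▸ hk)
      simp [contrib, List.count_cons, Ne.symm hk']

-- ===== VERDICT (by name: the statement is the Claim_ definition above) =====
theorem solve_spec : Claim_equal_solve := by
  intro nums _
  unfold Spec_solve solve_alt
  have hperm : (PySem.List.sorted nums (fun x => x) false).Perm nums :=
    PySem.List.sorted_perm nums (fun x => x) false
  have hpw : (PySem.List.sorted nums (fun x => x) false).Pairwise (· ≤ ·) :=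
    PySem.List.sorted_pairwise nums (fun x => x)
  rw [solve_eq_sum, pairLoop_eq_sum _ hpw, List.toFinset_eq_of_perm _ _ hperm]
  apply Finset.sum_congr rfl
  intro k _
  simp [contrib, hperm.count_eq]
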